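-- pv_equiv track=rewrite | github.com/djole103/algo | allstr2.py | allstr
-- ===== SOURCE A (Python) =====
-- def allstr(chars,string = ""):
-- 	results = []
-- 	for i in range(len(chars)):
-- 		string+=chars[i]
-- 		#if validword(string): results.append(string)
-- 		results.append(string)
-- 		results += allstr(chars[:i] + chars[i+1:],string)
-- 		string = string[:-1]
-- 	return results
-- ===== SOURCE B (Python) =====
-- def allstr(chars, string=""):
--     # Iterative DFS with an explicit work list instead of A's recursion with a
--     # threaded mutable prefix.  A stack entry (pref, rest) is a node: an emitted
--     # prefix together with the characters still unused; children(pref, "", rest)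
--     # lists its children left to right without any index arithmetic.
--     def children(pref, seen, rest):
--         if not rest:
--             return []
--         c, rest2 = rest[0], rest[1:]
--         return [(pref + c, seen + rest2)] + children(pref, seen + c, rest2)
--
--     results = []
--     stack = children(string, "", chars)
--     while stack:
--         pref, rest = stack.pop(0)
--         results.append(pref)
--         stack = children(pref, "", rest) + stack
--     return results
-- ===== Notes on version B (the rewrite author's own statement) =====
-- stated objective: alternative
-- what changed: Replaces A's recursion with a threaded mutable prefix (append / recurse on chars with index i cut out / pop) by an iterative DFS over an explicit work-list of (prefix, remaining-chars) nodes, whose children are generated by a structural seen/rest split with no index arithmetic.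
import Mathlib
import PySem

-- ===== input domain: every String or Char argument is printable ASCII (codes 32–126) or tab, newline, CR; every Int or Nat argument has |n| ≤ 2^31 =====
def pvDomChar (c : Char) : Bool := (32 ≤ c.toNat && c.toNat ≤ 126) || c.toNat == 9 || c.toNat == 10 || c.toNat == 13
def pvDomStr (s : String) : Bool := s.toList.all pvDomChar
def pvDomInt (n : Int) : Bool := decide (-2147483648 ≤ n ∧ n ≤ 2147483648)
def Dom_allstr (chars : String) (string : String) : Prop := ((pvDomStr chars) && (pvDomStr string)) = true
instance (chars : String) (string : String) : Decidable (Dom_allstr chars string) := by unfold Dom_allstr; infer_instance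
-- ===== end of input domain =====

-- B replaces A's prefix-threaded recursion by an iterative DFS over an explicit
-- work-list of (prefix, remaining) nodes; objective: alternative (same cost).


-- ===== PORT A =====
-- A's loop `for i in range(len(chars))`: each iteration appends chars[i] to the
-- mutable `string`, appends that to results, extends with the recursive call on
-- chars with index i removed, then restores `string` (string = string[:-1]); so
-- at the start of every iteration `string` equals the incoming argument.
-- Strings ported as List Char (chars[:i] + chars[i+1:] = take i ++ drop (i+1),
-- exact for i in range(len(chars))).
def allstrLoopA (chars : List Char) (string : List Char) (i : Nat) : List (List Char) :=
  if h : i < chars.length then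
    ((string ++ [chars[i]]) ::
      allstrLoopA (chars.take i ++ chars.drop (i + 1)) (string ++ [chars[i]]) 0)
    ++ allstrLoopA chars string (i + 1)
  else []
termination_by (chars.length, chars.length - i)
decreasing_by
  · left
    have := List.length_take_le i chars
    simp [List.length_append, List.length_take, List.length_drop]
    omega
  · right; omega

def allstr (chars : String) (string : String) : List String :=
  (allstrLoopA chars.toList string.toList 0).map String.mk

-- ===== PORT B =====
-- children(pref, seen, rest): structural recursion of Source B — pick rest's head c,
-- emit node (pref + c, seen + rest-after-c), move c into seen.
def childrenB (pref : List Char) (seen : List Char) (rest : List Char) :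
    List (List Char × List Char) :=
  match rest with
  | [] => []
  | c :: rest2 => (pref ++ [c], seen ++ rest2) :: childrenB pref (seen ++ [c]) rest2

-- number of DFS nodes below (and including) a node with n characters remaining;
-- termination measure for the while-loop.
def nodesCount : Nat → Nat
  | 0 => 1
  | n + 1 => 1 + (n + 1) * nodesCount n

def stackW (st : List (List Char × List Char)) : Nat :=
  (st.map (fun pr => nodesCount pr.2.length)).sum

theorem stackW_cons (p r : List Char) (st : List (List Char × List Char)) :
    stackW ((p, r) :: st) = nodesCount r.length + stackW st := by
  simp [stackW]

theorem stackW_childrenB (pref seen rest : List Char) :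
    stackW (childrenB pref seen rest)
      = rest.length * nodesCount (seen.length + rest.length - 1) := by
  induction rest generalizing seen with
  | nil => simp [childrenB, stackW]
  | cons c rest2 ih =>
    rw [childrenB, stackW_cons, ih (seen ++ [c])]
    simp only [List.length_append, List.length_cons, List.length_nil]
    have e1 : seen.length + 1 + rest2.length - 1 = seen.length + rest2.length := by omega
    have e2 : seen.length + (rest2.length + 1) - 1 = seen.length + rest2.length := by omega
    rw [e1, e2]
    ring

theorem stackW_childrenB_lt (pref : List Char) (rest : List Char) :
    stackW (childrenB pref [] rest) < nodesCount rest.length := by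
  rw [stackW_childrenB]
  cases rest with
  | nil => simp [nodesCount]
  | cons c r2 =>
    simp only [List.length_cons, List.length_nil, Nat.zero_add, Nat.add_sub_cancel,
      nodesCount]
    omega

-- the while-loop of Source B: pop the front node, record its prefix, prepend its children.
def bLoop (stack : List (List Char × List Char)) : List (List Char) :=
  match stack with
  | [] => []
  | (pref, rest) :: st => pref :: bLoop (childrenB pref [] rest ++ st)
termination_by stackW stack
decreasing_by
  have h := stackW_childrenB_lt pref rest
  simp only [stackW, List.map_append, List.sum_append, List.map_cons, List.sum_cons] at *
  omega

def allstr_alt (chars : String) (string : String) : List String :=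
  (bLoop (childrenB string.toList [] chars.toList)).map String.mk

-- ===== PRECONDITION & SPEC =====
def Spec_allstr (chars : String) (string : String) (out : List String) : Prop := out = allstr_alt chars string
instance (chars : String) (string : String) (out : List String) : Decidable (Spec_allstr chars string out) := by unfold Spec_allstr; infer_instance

-- ===== CLAIM (what is proved, stated in full; the proofs are below) =====
def Claim_equal_allstr : Prop := ∀ (chars : String) (string : String), Dom_allstr chars string → Spec_allstr chars string (allstr chars string)

-- ===== LEMMAS AND PROOFS =====

-- the DFS work-list processes independent segments independently
theorem bLoop_append (a b : List (List Char × List Char)) :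
    bLoop (a ++ b) = bLoop a ++ bLoop b := by
  match a with
  | [] => simp [bLoop]
  | (pref, rest) :: a' =>
    rw [List.cons_append, bLoop, bLoop, ← List.append_assoc,
        bLoop_append (childrenB pref [] rest ++ a') b, List.cons_append]
termination_by stackW a
decreasing_by
  have h := stackW_childrenB_lt pref rest
  simp only [stackW, List.map_append, List.sum_append, List.map_cons, List.sum_cons] at *
  omega

-- A's loop from index i equals B's DFS started on the children built from the
-- suffix cs.drop i with cs.take i already moved to `seen`.
theorem allstrLoopA_eq_bLoop (cs string : List Char) (i : Nat) :
    allstrLoopA cs string i = bLoop (childrenB string (cs.take i) (cs.drop i)) := by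
  rw [allstrLoopA]
  split
  · next h =>
    rw [List.drop_eq_getElem_cons h, childrenB, bLoop, bLoop_append,
        allstrLoopA_eq_bLoop (cs.take i ++ cs.drop (i + 1)) (string ++ [cs[i]]) 0,
        allstrLoopA_eq_bLoop cs string (i + 1)]
    have ht : cs.take (i + 1) = cs.take i ++ [cs[i]] := by
      rw [List.take_add_one, List.getElem?_eq_getElem h]
      rfl
    rw [ht]
    simp
  · next h =>
    rw [List.drop_eq_nil_of_le (by omega), childrenB, bLoop]
termination_by (cs.length, cs.length - i)
decreasing_by
  · left
    have := List.length_take_le i cs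
    simp [List.length_append, List.length_take, List.length_drop]
    omega
  · right; omega

-- ===== VERDICT (by name: the statement is the Claim_ definition above) =====
theorem allstr_spec : Claim_equal_allstr := by
  intro chars string _
  unfold Spec_allstr allstr allstr_alt
  rw [allstrLoopA_eq_bLoop]
  simp
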